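-- pv_equiv track=rewrite | github.com/NDelan/SolvePythonPracticeProblems | good_or_bad_str.py | isGoodorBad
-- ===== SOURCE A (Python) =====
-- def isGoodorBad(S):
--     # code here
--     vowels = ['a','e','i','o','u']
--     vow_cnt = 0
--     cons_cnt = 0
--     for i in S:
--         if i in vowels:
--             vow_cnt+=1
--             cons_cnt = 0
--         elif i == '?':
--             vow_cnt+=1
--             cons_cnt+=1
--         else:
--             cons_cnt += 1
--             vow_cnt = 0
--         if cons_cnt > 3 or vow_cnt > 5:
--             return 0
--     return 1
-- ===== SOURCE B (Python) =====
-- def isGoodorBad(S):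
--     n = len(S)
--     bad = any(all(c in 'aeiou?' for c in S[i:i+6]) for i in range(n - 5)) \
--        or any(all(c not in 'aeiou' for c in S[i:i+4]) for i in range(n - 3))
--     return 0 if bad else 1
-- ===== Notes on version B (the rewrite author's own statement) =====
-- stated objective: idiomatic
-- what changed: Replaces the stateful two-counter scan with two declarative sliding-window any/all checks: bad iff some 6-window is all of [aeiou?] or some 4-window is all non-vowels.
import Mathlib
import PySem

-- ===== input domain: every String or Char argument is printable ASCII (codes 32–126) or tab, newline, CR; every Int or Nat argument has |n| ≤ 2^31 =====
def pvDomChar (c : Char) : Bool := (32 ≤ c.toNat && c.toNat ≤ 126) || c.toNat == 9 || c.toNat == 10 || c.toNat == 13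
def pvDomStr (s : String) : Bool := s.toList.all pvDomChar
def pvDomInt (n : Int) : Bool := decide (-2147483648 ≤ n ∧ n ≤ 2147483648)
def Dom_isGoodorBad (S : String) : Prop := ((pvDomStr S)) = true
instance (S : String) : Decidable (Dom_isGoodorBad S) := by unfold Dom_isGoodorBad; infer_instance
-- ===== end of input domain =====

set_option maxHeartbeats 1000000


-- B replaces A's stateful two-counter scan by two declarative sliding-window any/all checks; same return value on all strings.

-- ===== PORT A =====
def pvVowels : List Char := ['a', 'e', 'i', 'o', 'u']

-- the for-loop of A, state = (vow_cnt, cons_cnt); the early `return 0` is the 0 branch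
def pvLoopA : List Char → Int → Int → Int
  | [], _, _ => 1
  | c :: rest, vow_cnt, cons_cnt =>
    let p : Int × Int :=
      if pvVowels.contains c then (vow_cnt + 1, 0)
      else if c == '?' then (vow_cnt + 1, cons_cnt + 1)
      else (0, cons_cnt + 1)
    if p.2 > 3 ∨ p.1 > 5 then 0 else pvLoopA rest p.1 p.2

def isGoodorBad (S : String) : Int := pvLoopA S.toList 0 0

-- ===== PORT B =====
def isGoodorBad_alt (S : String) : Int :=
  let s := S.toList
  let bad :=
    (List.range (s.length - 5)).any (fun i =>
      (PySem.List.slice s (some (i : Int)) (some ((i : Int) + 6))).all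
        (fun c => ("aeiou?".toList).contains c))
    || (List.range (s.length - 3)).any (fun i =>
      (PySem.List.slice s (some (i : Int)) (some ((i : Int) + 4))).all
        (fun c => !(("aeiou".toList).contains c)))
  if bad then 0 else 1

-- ===== PRECONDITION & SPEC =====
def Spec_isGoodorBad (S : String) (out : Int) : Prop := out = isGoodorBad_alt S
instance (S : String) (out : Int) : Decidable (Spec_isGoodorBad S out) := by unfold Spec_isGoodorBad; infer_instance

-- ===== CLAIM (what is proved, stated in full; the proofs are below) =====
def Claim_equal_isGoodorBad : Prop := ∀ (S : String), Dom_isGoodorBad S → Spec_isGoodorBad S (isGoodorBad S)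

-- ===== LEMMAS AND PROOFS =====

-- character classes: vowel-or-'?' (feeds vow_cnt) and non-vowel (feeds cons_cnt)
def pvVw (c : Char) : Bool := pvVowels.contains c || c == '?'
def pvNv (c : Char) : Bool := !pvVowels.contains c

-- pvRunCont p m xs: the first m+1 chars of xs exist and all satisfy p
def pvRunCont (p : Char → Bool) : Nat → List Char → Bool
  | _, [] => false
  | m, c :: rest => p c && (m == 0 || pvRunCont p (m - 1) rest)

-- some window of 6 pvVw-chars or of 4 pvNv-chars occurs in xs
def pvWinBad : List Char → Bool
  | [] => false
  | c :: rest => pvRunCont pvVw 5 (c :: rest) || pvRunCont pvNv 3 (c :: rest) || pvWinBad rest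

theorem pvRunCont_mono (p : Char → Bool) :
    ∀ (xs : List Char) (m m' : Nat), m' ≤ m → pvRunCont p m xs = true → pvRunCont p m' xs = true := by
  intro xs
  induction xs with
  | nil => intro m m' _ h; simp [pvRunCont] at h
  | cons c rest ih =>
    intro m m' hle h
    simp [pvRunCont] at h ⊢
    obtain ⟨hc, hrest⟩ := h
    refine ⟨hc, ?_⟩
    rcases hrest with h0 | hr
    · subst h0; left; omega
    · by_cases hm' : m' = 0
      · left; exact hm'
      · right; exact ih _ _ (by omega) hr

theorem pvRunCont_eq (p : Char → Bool) :
    ∀ (xs : List Char) (m : Nat),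
      pvRunCont p m xs = (decide (m + 1 ≤ xs.length) && (xs.take (m + 1)).all p) := by
  intro xs
  induction xs with
  | nil => intro m; simp [pvRunCont]
  | cons c rest ih =>
    intro m
    cases m with
    | zero => simp [pvRunCont]
    | succ n =>
      simp [pvRunCont, ih n, List.all_cons]
      by_cases hc : p c <;> simp [hc]

theorem pvAbsorb (xs : List Char) :
    (pvRunCont pvNv 3 xs || pvRunCont pvVw 5 xs || pvWinBad xs) = pvWinBad xs := by
  cases xs with
  | nil => simp [pvRunCont, pvWinBad]
  | cons c rest =>
    apply Bool.eq_iff_iff.mpr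
    simp [pvWinBad]
    tauto

theorem pvVwNv (c : Char) (h : pvNv c = false) : pvVw c = true := by
  simp [pvNv] at h
  simp [pvVw, h]

theorem pvLoopA_cons (c : Char) (rest : List Char) (v k : Int) :
    pvLoopA (c :: rest) v k =
      if (if pvNv c = true then k + 1 else 0) > 3 ∨ (if pvVw c = true then v + 1 else 0) > 5 then 0
      else pvLoopA rest (if pvVw c = true then v + 1 else 0) (if pvNv c = true then k + 1 else 0) := by
  by_cases h1 : c ∈ pvVowels
  · have hq : ¬ (c = '?') := by
      revert h1; simp [pvVowels]
      rintro (rfl | rfl | rfl | rfl | rfl) <;> decide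
    simp [pvLoopA, pvVw, pvNv, h1]
  · by_cases h2 : c = '?'
    · have h4 : ¬ ('?' ∈ pvVowels) := by decide
      simp [pvLoopA, pvVw, pvNv, h2, h4]
    · simp [pvLoopA, pvVw, pvNv, h1, h2]

theorem pvWin_of_vw (xs : List Char) (h : pvRunCont pvVw 5 xs = true) : pvWinBad xs = true := by
  cases xs with
  | nil => simp [pvRunCont] at h
  | cons c rest => simp [pvWinBad, h]

theorem pvWin_of_nv (xs : List Char) (h : pvRunCont pvNv 3 xs = true) : pvWinBad xs = true := by
  cases xs with
  | nil => simp [pvRunCont] at h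
  | cons c rest => simp [pvWinBad, h]

theorem pvLoopA_eq :
    ∀ (xs : List Char) (v k : Int), 0 ≤ v → v ≤ 5 → 0 ≤ k → k ≤ 3 →
      pvLoopA xs v k =
        if pvRunCont pvNv (3 - k).toNat xs || pvRunCont pvVw (5 - v).toNat xs || pvWinBad xs
        then 0 else 1 := by
  intro xs
  induction xs with
  | nil => intro v k _ _ _ _; simp [pvLoopA, pvRunCont, pvWinBad]
  | cons c rest ih =>
    intro v k hv0 hv5 hk0 hk3
    rw [pvLoopA_cons]
    by_cases hn : pvNv c = true
    · by_cases hw : pvVw c = true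
      · -- '?': both counters advance
        simp only [hn, hw, reduceIte]
        by_cases hstop : k = 3 ∨ v = 5
        · rw [if_pos (by omega)]
          have : (pvRunCont pvNv (3 - k).toNat (c :: rest) || pvRunCont pvVw (5 - v).toNat (c :: rest)
              || pvWinBad (c :: rest)) = true := by
            simp [pvRunCont, hn, hw]
            rcases hstop with h | h
            · left; left; left; omega
            · left; right; left; omega
          rw [this, if_pos rfl]
        · rw [not_or] at hstop
          rw [if_neg (by omega), ih (v + 1) (k + 1) (by omega) (by omega) (by omega) (by omega)]
          have e1 : (3 - k).toNat - 1 = (3 - (k + 1)).toNat := by omega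
          have e2 : (5 - v).toNat - 1 = (5 - (v + 1)).toNat := by omega
          apply (if_congr · rfl rfl)
          have m2 := pvRunCont_mono pvVw rest 4 (5 - (v + 1)).toNat (by omega)
          have m4 := pvRunCont_mono pvNv rest 2 (3 - (k + 1)).toNat (by omega)
          have w1 := pvWin_of_nv rest
          have w2 := pvWin_of_vw rest
          have a1 : ¬ ((3 : Int) ≤ k) := by omega
          have a2 : ¬ ((5 : Int) ≤ v) := by omega
          simp [pvWinBad, pvRunCont, hn, hw, e1, e2, a1, a2]
          tauto
      · -- consonant: cons_cnt advances, vow_cnt resets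
        have hwv : pvVw c = false := by simpa using hw
        simp only [hn, hwv, Bool.false_eq_true, if_false, reduceIte]
        by_cases hstop : k = 3
        · rw [if_pos (by omega)]
          have : (pvRunCont pvNv (3 - k).toNat (c :: rest) || pvRunCont pvVw (5 - v).toNat (c :: rest)
              || pvWinBad (c :: rest)) = true := by
            simp [pvRunCont, hn]
            left; left; left; omega
          rw [this, if_pos rfl]
        · rw [if_neg (by omega), ih 0 (k + 1) (by omega) (by omega) (by omega) (by omega)]
          have e1 : (3 - k).toNat - 1 = (3 - (k + 1)).toNat := by omega
          apply (if_congr · rfl rfl)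
          have m4 := pvRunCont_mono pvNv rest 2 (3 - (k + 1)).toNat (by omega)
          have w1 := pvWin_of_nv rest
          have w2 := pvWin_of_vw rest
          have a1 : ¬ ((3 : Int) ≤ k) := by omega
          simp [pvWinBad, pvRunCont, hn, hwv, e1, a1]
          tauto
    · -- vowel: vow_cnt advances, cons_cnt resets
      have hw := pvVwNv c (by simpa using hn)
      have hnv : pvNv c = false := by simpa using hn
      simp only [hw, hnv, Bool.false_eq_true, if_false, reduceIte]
      by_cases hstop : v = 5
      · rw [if_pos (by omega)]
        have : (pvRunCont pvNv (3 - k).toNat (c :: rest) || pvRunCont pvVw (5 - v).toNat (c :: rest)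
            || pvWinBad (c :: rest)) = true := by
          simp [pvRunCont, hnv, hw]
          left; left; omega
        rw [this, if_pos rfl]
      · rw [if_neg (by omega), ih (v + 1) 0 (by omega) (by omega) (by omega) (by omega)]
        have e2 : (5 - v).toNat - 1 = (5 - (v + 1)).toNat := by omega
        apply (if_congr · rfl rfl)
        have m2 := pvRunCont_mono pvVw rest 4 (5 - (v + 1)).toNat (by omega)
        have w1 := pvWin_of_nv rest
        have w2 := pvWin_of_vw rest
        have a2 : ¬ ((5 : Int) ≤ v) := by omega
        simp [pvWinBad, pvRunCont, hnv, hw, e2, a2]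
        tauto

theorem pvWinBad_exists (xs : List Char) :
    pvWinBad xs = true ↔
      (∃ i, i + 6 ≤ xs.length ∧ ((xs.drop i).take 6).all pvVw = true) ∨
      (∃ i, i + 4 ≤ xs.length ∧ ((xs.drop i).take 4).all pvNv = true) := by
  induction xs with
  | nil => simp [pvWinBad]
  | cons c rest ih =>
    simp only [pvWinBad, Bool.or_eq_true, ih, pvRunCont_eq, Bool.and_eq_true, decide_eq_true_iff]
    constructor
    · rintro ((⟨h1, h2⟩ | ⟨h1, h2⟩) | (⟨i, h1, h2⟩ | ⟨i, h1, h2⟩))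
      · exact Or.inl ⟨0, by simpa using h1, by simpa using h2⟩
      · exact Or.inr ⟨0, by simpa using h1, by simpa using h2⟩
      · exact Or.inl ⟨i + 1, by simp; omega, by simpa using h2⟩
      · exact Or.inr ⟨i + 1, by simp; omega, by simpa using h2⟩
    · rintro (⟨i, h1, h2⟩ | ⟨i, h1, h2⟩)
      · cases i with
        | zero => exact Or.inl (Or.inl ⟨by simpa using h1, by simpa using h2⟩)
        | succ j => exact Or.inr (Or.inl ⟨j, by simp at h1 ⊢; omega, by simpa using h2⟩)
      · cases i with
        | zero => exact Or.inl (Or.inr ⟨by simpa using h1, by simpa using h2⟩)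
        | succ j => exact Or.inr (Or.inr ⟨j, by simp at h1 ⊢; omega, by simpa using h2⟩)

theorem pvVwChar (c : Char) : ("aeiou?".toList).contains c = pvVw c := by
  have h : "aeiou?".toList = ['a', 'e', 'i', 'o', 'u', '?'] := by decide
  rw [h]
  apply Bool.eq_iff_iff.mpr
  simp [pvVw, pvVowels]
  tauto

theorem pvSlice (s : List Char) (i : Nat) (n : Nat) :
    PySem.List.slice s (some (i : Int)) (some ((i : Int) + (n : Int))) = (s.drop i).take n :=
  PySem.List.slice_natCast_add s i n

-- ===== VERDICT (by name: the statement is the Claim_ definition above) =====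
theorem isGoodorBad_spec : Claim_equal_isGoodorBad := by
  intro S _
  unfold Spec_isGoodorBad isGoodorBad isGoodorBad_alt
  rw [pvLoopA_eq S.toList 0 0 (by omega) (by omega) (by omega) (by omega)]
  have e3 : ((3 : Int) - 0).toNat = 3 := by decide
  have e5 : ((5 : Int) - 0).toNat = 5 := by decide
  rw [e3, e5, pvAbsorb S.toList]
  dsimp only
  apply (if_congr · rfl rfl)
  rw [pvWinBad_exists]
  have h6 : ∀ i : Nat, PySem.List.slice S.toList (some (i : Int)) (some ((i : Int) + 6))
      = (S.toList.drop i).take 6 := by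
    intro i; have := pvSlice S.toList i 6; norm_num at this; exact this
  have h4 : ∀ i : Nat, PySem.List.slice S.toList (some (i : Int)) (some ((i : Int) + 4))
      = (S.toList.drop i).take 4 := by
    intro i; have := pvSlice S.toList i 4; norm_num at this; exact this
  have hall6 : ∀ l : List Char, l.all (fun c => ("aeiou?".toList).contains c) = l.all pvVw := by
    intro l; congr 1; funext x; exact pvVwChar x
  have hall4 : ∀ l : List Char, l.all (fun c => !(("aeiou".toList).contains c)) = l.all pvNv := by
    intro l; rfl
  simp only [Bool.or_eq_true, List.any_eq_true, List.mem_range]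
  constructor
  · rintro (⟨i, h1, h2⟩ | ⟨i, h1, h2⟩)
    · refine Or.inl ⟨i, by omega, ?_⟩
      rw [h6, hall6]; exact h2
    · refine Or.inr ⟨i, by omega, ?_⟩
      rw [h4, hall4]; exact h2
  · rintro (⟨i, h1, h2⟩ | ⟨i, h1, h2⟩)
    · refine Or.inl ⟨i, by omega, ?_⟩
      rw [h6, hall6] at h2; exact h2
    · refine Or.inr ⟨i, by omega, ?_⟩
      rw [h4, hall4] at h2; exact h2
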